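-- pv_equiv track=rewrite | github.com/BraveGroup/DriveVLA-W0 | tools/pickle_gen/nuplan_pickle_gen/step1_segment_videos.py | calculate_valid_segments
-- ===== SOURCE A (Python) =====
-- SAMPLING_RATE = 10.0  # Hz
--
-- SEGMENT_LENGTH_SECONDS = 20
--
-- MIN_SEGMENT_SECONDS = 8
--
-- def calculate_valid_segments(total_frames):
--     """计算有效的视频段，现在不排除最后的帧（因为会用0填充action）"""
--     min_frames = int(MIN_SEGMENT_SECONDS * SAMPLING_RATE)  # 80帧
--     segment_frames = int(SEGMENT_LENGTH_SECONDS * SAMPLING_RATE)  # 200帧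
--
--     if total_frames < min_frames:
--         return []
--
--     segments = []
--     if total_frames >= segment_frames:
--         # 切分20秒段
--         for start in range(0, total_frames, segment_frames):
--             end = min(start + segment_frames, total_frames)
--             if end - start >= min_frames:
--                 segments.append((start, end))
--     elif total_frames >= min_frames:
--         # 8-20秒，保留为一段
--         segments.append((0, total_frames))
--
--     return segments
-- ===== SOURCE B (Python) =====
-- SAMPLING_RATE = 10.0  # Hz
--
-- SEGMENT_LENGTH_SECONDS = 20
--
-- MIN_SEGMENT_SECONDS = 8
--
-- def calculate_valid_segments(total_frames):
--     """Back-to-front: peel segments off the end, snapping each boundary down to the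
--     previous multiple of 200; reverse at the end."""
--     min_frames = int(MIN_SEGMENT_SECONDS * SAMPLING_RATE)      # 80
--     segment_frames = int(SEGMENT_LENGTH_SECONDS * SAMPLING_RATE)  # 200
--     if total_frames < min_frames:
--         return []
--     segments = []
--     end = total_frames
--     while end >= min_frames:
--         start = (end - 1) // segment_frames * segment_frames
--         if end - start >= min_frames:
--             segments.append((start, end))
--         end = start
--     return segments[::-1]
-- ===== Notes on version B (the rewrite author's own statement) =====
-- stated objective: alternative
-- what changed: A iterates forward over a stepped range computing each segment end with min and a length check; B instead peels segments off the END in a while loop, snapping each boundary down to the previous segment-length multiple with floor division, collecting in reverse order and reversing once at the end.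
import Mathlib
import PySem

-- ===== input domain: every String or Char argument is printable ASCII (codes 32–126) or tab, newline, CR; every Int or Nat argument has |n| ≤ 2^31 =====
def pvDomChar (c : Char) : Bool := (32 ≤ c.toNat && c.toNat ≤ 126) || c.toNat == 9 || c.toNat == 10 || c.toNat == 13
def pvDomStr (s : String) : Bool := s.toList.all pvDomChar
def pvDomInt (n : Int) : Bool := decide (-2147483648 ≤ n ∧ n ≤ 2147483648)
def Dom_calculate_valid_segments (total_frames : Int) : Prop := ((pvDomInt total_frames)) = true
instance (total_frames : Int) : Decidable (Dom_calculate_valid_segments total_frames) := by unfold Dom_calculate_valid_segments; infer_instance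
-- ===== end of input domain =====

-- B replaces A's forward stepped-range loop (per-segment min/length check) by a backwards
-- while loop peeling segments off the end, snapping boundaries down to multiples of 200 and
-- reversing once at the end; same cost, a different traversal.

-- ===== PORT A =====
def calculate_valid_segments (total_frames : Int) : List (Int × Int) :=
  let min_frames : Int := 80
  let segment_frames : Int := 200
  if total_frames < min_frames then
    []
  else
    let segments : List (Int × Int) := []
    if total_frames ≥ segment_frames then
      (PySem.List.pyRange 0 total_frames segment_frames).foldl
        (fun segments start =>
          let e := min (start + segment_frames) total_frames
          if e - start ≥ min_frames then segments ++ [(start, e)] else segments)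
        segments
    else if total_frames ≥ min_frames then
      segments ++ [(0, total_frames)]
    else
      segments

-- ===== PORT B =====
-- B's while loop: end decreases to the previous multiple of 200 each iteration.
-- The Nat fuel (initialised to e.toNat, an upper bound on the iteration count) is only a
-- totality device for the while loop; it never changes the computed value.
def cvsGoB : Nat → Int → List (Int × Int) → List (Int × Int)
  | 0, _, segments => segments
  | fuel + 1, e, segments =>
    if 80 ≤ e then
      let start := PySem.Int.floordiv (e - 1) 200 * 200
      cvsGoB fuel start (if 80 ≤ e - start then segments ++ [(start, e)] else segments)
    else segments

def calculate_valid_segments_alt (total_frames : Int) : List (Int × Int) :=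
  let min_frames : Int := 80
  if total_frames < min_frames then
    []
  else
    -- segments[::-1] : slice with step -1 reverses the list
    (cvsGoB total_frames.toNat total_frames []).reverse

-- ===== PRECONDITION & SPEC =====
def Spec_calculate_valid_segments (total_frames : Int) (out : List (Int × Int)) : Prop := out = calculate_valid_segments_alt total_frames
instance (total_frames : Int) (out : List (Int × Int)) : Decidable (Spec_calculate_valid_segments total_frames out) := by unfold Spec_calculate_valid_segments; infer_instance

-- ===== CLAIM (what is proved, stated in full; the proofs are below) =====
def Claim_equal_calculate_valid_segments : Prop := ∀ (total_frames : Int), Dom_calculate_valid_segments total_frames → Spec_calculate_valid_segments total_frames (calculate_valid_segments total_frames)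

-- ===== LEMMAS AND PROOFS =====

-- A's loop over the complete (length-200) segments appends exactly one pair per index.
lemma foldA (tf : Int) : ∀ (m : Nat), 200 * (m : Int) ≤ tf → ∀ (acc : List (Int × Int)),
    List.foldl
      (fun segments start =>
        if 80 ≤ min (start + 200) tf - start then segments ++ [(start, min (start + 200) tf)]
        else segments)
      acc (List.map (fun k : Nat => (0 : Int) + 200 * (k : Int)) (List.range m))
    = acc ++ List.map (fun k : Nat => (200 * (k : Int), 200 * ((k : Int) + 1))) (List.range m) := by
  intro m
  induction m with
  | zero => intro _ acc; simp
  | succ m ih =>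
    intro hm acc
    have hm' : 200 * (m : Int) ≤ tf := by push_cast at hm ⊢; omega
    have hmin : min ((0 : Int) + 200 * (m : Int) + 200) tf = 0 + 200 * (m : Int) + 200 := by
      push_cast at hm; omega
    rw [List.range_succ, List.map_append, List.foldl_append, ih hm' acc]
    simp only [List.map_cons, List.map_nil, List.foldl_cons, List.foldl_nil, hmin]
    rw [if_pos (by omega)]
    rw [List.map_append, List.append_assoc]
    simp only [List.map_cons, List.map_nil]
    norm_num
    ring

-- B's loop on a multiple of 200: emits the complete segments in reverse order.
lemma goB_mul : ∀ (m : Nat), ∀ (fuel : Nat), m ≤ fuel → ∀ (acc : List (Int × Int)),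
    cvsGoB fuel (200 * (m : Int)) acc
      = acc ++ ((List.range m).reverse.map (fun k : Nat => (200 * (k : Int), 200 * ((k : Int) + 1)))) := by
  intro m
  induction m with
  | zero =>
    intro fuel _ acc
    cases fuel with
    | zero => simp [cvsGoB]
    | succ f => norm_num [cvsGoB]
  | succ m ih =>
    intro fuel hmf acc
    obtain ⟨f, rfl⟩ : ∃ f, fuel = f + 1 := ⟨fuel - 1, by omega⟩
    rw [cvsGoB]
    push_cast
    rw [if_pos (by omega : (80 : Int) ≤ 200 * ((m : Int) + 1))]
    have hfd : PySem.Int.floordiv (200 * ((m : Int) + 1) - 1) 200 = (m : Int) := by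
      rw [PySem.Int.floordiv_eq_ediv_of_pos (by norm_num)]
      have : 200 * ((m : Int) + 1) - 1 = 200 * (m : Int) + 199 := by ring
      rw [this]; omega
    simp only [hfd]
    rw [if_pos (by omega)]
    have hms : (m : Int) * 200 = 200 * (m : Int) := by ring
    rw [hms, ih f (by omega), List.range_succ, List.reverse_append]
    simp [mul_comm]

-- B's closed form for any tf ≥ 80: full = tf/200 complete segments, then the tail iff ≥ 80 frames.
lemma goB_closed (tf : Int) (h80 : 80 ≤ tf) :
    (cvsGoB tf.toNat tf []).reverse
      = (List.range (tf / 200).toNat).map (fun k : Nat => (200 * (k : Int), 200 * ((k : Int) + 1)))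
        ++ (if 80 ≤ tf - 200 * (tf / 200) then [(200 * (tf / 200), tf)] else []) := by
  have hq0 : 0 ≤ tf / 200 := Int.ediv_nonneg (by omega) (by norm_num)
  have hql : 200 * (tf / 200) ≤ tf := by
    have := Int.ediv_mul_le tf (by norm_num : (200:Int) ≠ 0); omega
  have hqu : tf - 200 * (tf / 200) < 200 := by
    have := Int.lt_ediv_add_one_mul_self tf (by norm_num : (0:Int) < 200); omega
  have hqcast : ((tf / 200).toNat : Int) = tf / 200 := Int.toNat_of_nonneg hq0
  by_cases hr : tf = 200 * (tf / 200)
  · -- exact multiple of 200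
    have hfuel : (tf / 200).toNat ≤ tf.toNat := by omega
    have hmul := goB_mul (tf / 200).toNat tf.toNat hfuel []
    rw [hqcast, ← hr] at hmul
    rw [hmul, if_neg (by omega)]
    simp [List.map_reverse]
  · -- tf has a positive remainder: one manual step, then goB_mul
    obtain ⟨f, hf⟩ : ∃ f, tf.toNat = f + 1 := ⟨tf.toNat - 1, by omega⟩
    rw [hf, cvsGoB, if_pos h80]
    have hfd : PySem.Int.floordiv (tf - 1) 200 = tf / 200 := by
      rw [PySem.Int.floordiv_eq_ediv_of_pos (by norm_num)]
      omega
    simp only [hfd]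
    have hfuel : (tf / 200).toNat ≤ f := by omega
    have hmul1 := goB_mul (tf / 200).toNat f hfuel [(tf / 200 * 200, tf)]
    have hmul2 := goB_mul (tf / 200).toNat f hfuel []
    rw [hqcast] at hmul1 hmul2
    have hm : (200 : Int) * (tf / 200) = tf / 200 * 200 := by ring
    rw [hm] at hmul1 hmul2
    by_cases ht : 80 ≤ tf - tf / 200 * 200
    · rw [if_pos ht, List.nil_append, hmul1, if_pos (by omega)]
      simp [List.map_reverse, mul_comm]
    · rw [if_neg ht, hmul2, if_neg (by omega)]
      simp [List.map_reverse, mul_comm]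

theorem calculate_valid_segments_spec : Claim_equal_calculate_valid_segments := by
  intro tf _
  unfold Spec_calculate_valid_segments calculate_valid_segments calculate_valid_segments_alt
  by_cases h80 : tf < 80
  · simp [h80]
  · simp only [if_neg h80, ge_iff_le]
    rw [goB_closed tf (by omega)]
    by_cases h200 : 200 ≤ tf
    · -- main case: tf ≥ 200, A runs the stepped-range loop
      rw [if_pos h200]
      rw [PySem.List.pyRange_of_pos 0 tf (by norm_num : (0:Int) < 200),
          if_pos (by omega : (0:Int) < tf)]
      have hq0 : 0 ≤ tf / 200 := Int.ediv_nonneg (by omega) (by norm_num)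
      have hql : 200 * (tf / 200) ≤ tf := by
        have := Int.ediv_mul_le tf (by norm_num : (200:Int) ≠ 0); omega
      have hqu : tf - 200 * (tf / 200) < 200 := by
        have := Int.lt_ediv_add_one_mul_self tf (by norm_num : (0:Int) < 200); omega
      by_cases hr : tf = 200 * (tf / 200)
      · -- exact multiple: no tail
        have hn : ((tf - 0 + 200 - 1) / 200).toNat = (tf / 200).toNat := by omega
        rw [hn, foldA tf (tf / 200).toNat (by omega) [], if_neg (by omega)]
        simp
      · -- positive remainder: loop has one extra (partial) iteration
        have hn : ((tf - 0 + 200 - 1) / 200).toNat = (tf / 200).toNat + 1 := by omega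
        rw [hn, List.range_succ, List.map_append, List.foldl_append,
            foldA tf (tf / 200).toNat (by omega) []]
        have hc : (((tf / 200).toNat : Nat) : Int) = tf / 200 := by omega
        simp only [List.map_cons, List.map_nil, List.foldl_cons, List.foldl_nil,
          hc, List.nil_append]
        have hmin : min ((0 : Int) + 200 * (tf / 200) + 200) tf = tf := by omega
        rw [hmin]
        by_cases ht : 80 ≤ tf - (0 + 200 * (tf / 200))
        · rw [if_pos (by omega), if_pos (by omega)]
          have : (0 : Int) + 200 * (tf / 200) = 200 * (tf / 200) := by ring
          rw [this]
        · rw [if_neg (by omega), if_neg (by omega)]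
          simp
    · -- 80 ≤ tf < 200: A takes the elif branch; B's closed form has full = 0 and the tail
      have hq : tf / 200 = 0 := by omega
      rw [if_neg h200, if_pos (by omega : tf ≥ 80), hq]
      rw [if_pos (by omega : (80:Int) ≤ tf - 200 * 0)]
      simp
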